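-- pv_equiv track=rewrite | github.com/GuilhermeMachadoVieira/TradutorOn | src/utils/language_detector.py | _count_chars_in_ranges
-- ===== SOURCE A (Python) =====
-- def _count_chars_in_ranges(text: str, ranges: list) -> int:
--     """Conta caracteres dentro de ranges Unicode."""
--     count = 0
--     for char in text:
--         code = ord(char)
--         for start, end in ranges:
--             if start <= code <= end:
--                 count += 1
--                 break
--     return count
-- ===== SOURCE B (Python) =====
-- def _merge(rs):
--     """Merge start-sorted ranges into disjoint, start-sorted intervals."""
--     merged = []
--     for s, e in reversed(rs):
--         # absorb every interval of `merged` that overlaps/continues [s, e]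
--         i = 0
--         while i < len(merged) and merged[i][0] <= e:
--             e = max(e, merged[i][1])
--             i += 1
--         merged = [(s, e)] + merged[i:]
--     return merged
--
--
-- def _count_chars_in_ranges(text: str, ranges: list) -> int:
--     """Conta caracteres dentro de ranges Unicode."""
--     merged = _merge(sorted(ranges, key=lambda r: r[0]))
--     count = 0
--     for char in text:
--         code = ord(char)
--         # merged is sorted by start and disjoint: stop at the first start past code
--         for s, e in merged:
--             if code < s:
--                 break
--             if code <= e:
--                 count += 1
--                 break
--     return count
-- ===== Notes on version B (the rewrite author's own statement) =====
-- stated objective: faster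
-- what changed: B sorts the ranges by start and merges them once into disjoint intervals, then tests each character against the merged list with an early exit at the first interval starting past the code point, instead of scanning the whole raw range list per character.
import Mathlib
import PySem

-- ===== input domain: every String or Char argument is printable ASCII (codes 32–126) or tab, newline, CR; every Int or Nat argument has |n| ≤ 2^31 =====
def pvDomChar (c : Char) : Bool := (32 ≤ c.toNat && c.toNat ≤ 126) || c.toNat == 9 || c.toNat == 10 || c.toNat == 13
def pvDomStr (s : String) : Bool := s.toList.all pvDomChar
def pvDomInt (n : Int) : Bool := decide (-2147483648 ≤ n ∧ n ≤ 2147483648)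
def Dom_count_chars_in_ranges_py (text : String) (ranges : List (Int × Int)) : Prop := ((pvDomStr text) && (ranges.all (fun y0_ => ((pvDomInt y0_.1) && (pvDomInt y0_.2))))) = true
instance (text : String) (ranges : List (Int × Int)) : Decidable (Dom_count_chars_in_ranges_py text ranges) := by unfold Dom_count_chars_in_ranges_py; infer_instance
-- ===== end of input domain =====

-- B sorts the ranges by start and merges them once into disjoint intervals, then counts
-- characters by scanning the merged list with an early exit (objective: faster range scans).


-- ===== PORT A =====
-- inner `for start, end in ranges: … break`: returns 1 at the first matching range, else 0
def aHit (code : Int) : List (Int × Int) → Int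
  | [] => 0
  | (s, e) :: rest => if s ≤ code ∧ code ≤ e then 1 else aHit code rest

def count_chars_in_ranges_py (text : String) (ranges : List (Int × Int)) : Int :=
  text.toList.foldl (fun count c => count + aHit (c.toNat : Int) ranges) 0

-- ===== PORT B =====
-- `while i < len(merged) and merged[i][0] <= e:` absorb loop, as structural recursion on `merged`
def bAbsorb (s e : Int) : List (Int × Int) → List (Int × Int)
  | [] => [(s, e)]
  | (s2, e2) :: rest => if s2 ≤ e then bAbsorb s (max e e2) rest else (s, e) :: (s2, e2) :: rest

-- `for s, e in reversed(rs): merged = absorb…` = right fold over rs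
def bMerge (rs : List (Int × Int)) : List (Int × Int) :=
  rs.foldr (fun r acc => bAbsorb r.1 r.2 acc) []

-- inner `for s, e in merged:` with the two breaks
def bScan (code : Int) : List (Int × Int) → Int
  | [] => 0
  | (s, e) :: rest => if code < s then 0 else if code ≤ e then 1 else bScan code rest

def count_chars_in_ranges_py_alt (text : String) (ranges : List (Int × Int)) : Int :=
  let merged := bMerge (PySem.List.sorted ranges Prod.fst)
  text.toList.foldl (fun count c => count + bScan (c.toNat : Int) merged) 0

-- ===== PRECONDITION & SPEC =====
def Spec_count_chars_in_ranges_py (text : String) (ranges : List (Int × Int)) (out : Int) : Prop := out = count_chars_in_ranges_py_alt text ranges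
instance (text : String) (ranges : List (Int × Int)) (out : Int) : Decidable (Spec_count_chars_in_ranges_py text ranges out) := by unfold Spec_count_chars_in_ranges_py; infer_instance

-- ===== CLAIM (what is proved, stated in full; the proofs are below) =====
def Claim_equal_count_chars_in_ranges_py : Prop := ∀ (text : String) (ranges : List (Int × Int)), Dom_count_chars_in_ranges_py text ranges → Spec_count_chars_in_ranges_py text ranges (count_chars_in_ranges_py text ranges)

-- ===== LEMMAS AND PROOFS =====

-- `x is covered by some range of rs`
def memB (x : Int) (rs : List (Int × Int)) : Bool :=
  rs.any (fun r => decide (r.1 ≤ x) && decide (x ≤ r.2))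

theorem memB_nil (x : Int) : memB x [] = false := rfl

theorem memB_cons (x : Int) (r : Int × Int) (rs : List (Int × Int)) :
    memB x (r :: rs) = ((decide (r.1 ≤ x) && decide (x ≤ r.2)) || memB x rs) := rfl

theorem aHit_eq (x : Int) (rs : List (Int × Int)) :
    aHit x rs = if memB x rs then 1 else 0 := by
  induction rs with
  | nil => rfl
  | cons r rest ih =>
    obtain ⟨s, e⟩ := r
    simp only [aHit, ih, memB_cons]
    by_cases h1 : s ≤ x <;> by_cases h2 : x ≤ e <;> simp [h1, h2]

theorem memB_false (x : Int) (rs : List (Int × Int)) (h : ∀ r ∈ rs, x < r.1) :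
    memB x rs = false := by
  simp only [memB, List.any_eq_false]
  intro r hr
  have := h r hr
  simp
  omega

theorem memB_perm (x : Int) {rs rs' : List (Int × Int)} (h : rs.Perm rs') :
    memB x rs = memB x rs' := by
  simp only [memB]
  exact h.any_eq

theorem absorb_starts (c s e : Int) (rest : List (Int × Int)) (hcs : c ≤ s)
    (h : ∀ r ∈ rest, c ≤ r.1) : ∀ r ∈ bAbsorb s e rest, c ≤ r.1 := by
  induction rest generalizing e with
  | nil => simpa [bAbsorb] using hcs
  | cons r2 rest ih =>
    obtain ⟨s2, e2⟩ := r2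
    simp only [bAbsorb]
    split
    · exact ih _ (fun r hr => h r (List.mem_cons_of_mem _ hr))
    · intro r hr
      simp only [List.mem_cons] at hr
      rcases hr with h' | h' | h'
      · simp [h']; exact hcs
      · exact h _ (by simp [h'])
      · exact h _ (List.mem_cons_of_mem _ h')

theorem absorb_mem (x s e : Int) (rest : List (Int × Int))
    (h : ∀ r ∈ rest, s ≤ r.1) :
    memB x (bAbsorb s e rest) = ((decide (s ≤ x) && decide (x ≤ e)) || memB x rest) := by
  induction rest generalizing e with
  | nil => simp [bAbsorb, memB_cons, memB_nil]
  | cons r2 rest ih =>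
    obtain ⟨s2, e2⟩ := r2
    have hs2 : s ≤ s2 := h (s2, e2) (by simp)
    simp only [bAbsorb]
    split
    · rename_i hle
      rw [ih _ (fun r hr => h r (List.mem_cons_of_mem _ hr)), memB_cons]
      by_cases h1 : s ≤ x <;> by_cases h2 : x ≤ e <;> by_cases h3 : s2 ≤ x <;>
        by_cases h4 : x ≤ e2 <;> simp [h1, h2, h3, h4] <;> omega
    · rfl

theorem absorb_pairwise (s e : Int) (rest : List (Int × Int))
    (h : ∀ r ∈ rest, s ≤ r.1)
    (hp : rest.Pairwise (fun a b => a.1 ≤ b.1)) :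
    (bAbsorb s e rest).Pairwise (fun a b => a.1 ≤ b.1) := by
  induction rest generalizing e with
  | nil => simp [bAbsorb]
  | cons r2 rest ih =>
    obtain ⟨s2, e2⟩ := r2
    simp only [bAbsorb]
    split
    · exact ih _ (fun r hr => h r (List.mem_cons_of_mem _ hr)) hp.of_cons
    · refine List.Pairwise.cons ?_ hp
      intro r hr
      simp only [List.mem_cons] at hr
      rcases hr with h' | h'
      · simp [h']; exact h (s2, e2) (by simp)
      · exact h r (List.mem_cons_of_mem _ h')

theorem bMerge_cons (r : Int × Int) (rs : List (Int × Int)) :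
    bMerge (r :: rs) = bAbsorb r.1 r.2 (bMerge rs) := rfl

theorem merge_starts (c : Int) (rs : List (Int × Int)) (h : ∀ r ∈ rs, c ≤ r.1) :
    ∀ r ∈ bMerge rs, c ≤ r.1 := by
  induction rs with
  | nil => simp [bMerge]
  | cons r rs ih =>
    rw [bMerge_cons]
    exact absorb_starts c r.1 r.2 _ (h r (by simp))
      (ih (fun r' hr' => h r' (List.mem_cons_of_mem _ hr')))

theorem merge_mem (x : Int) (rs : List (Int × Int))
    (hp : rs.Pairwise (fun a b => a.1 ≤ b.1)) :
    memB x (bMerge rs) = memB x rs := by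
  induction rs with
  | nil => rfl
  | cons r rs ih =>
    rw [bMerge_cons, memB_cons,
      absorb_mem x r.1 r.2 _ (merge_starts r.1 rs (fun r' hr' => List.rel_of_pairwise_cons hp hr')),
      ih hp.of_cons]

theorem merge_pairwise (rs : List (Int × Int))
    (hp : rs.Pairwise (fun a b => a.1 ≤ b.1)) :
    (bMerge rs).Pairwise (fun a b => a.1 ≤ b.1) := by
  induction rs with
  | nil => simp [bMerge]
  | cons r rs ih =>
    rw [bMerge_cons]
    exact absorb_pairwise r.1 r.2 _
      (merge_starts r.1 rs (fun r' hr' => List.rel_of_pairwise_cons hp hr'))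
      (ih hp.of_cons)

theorem bScan_eq (x : Int) (m : List (Int × Int))
    (hp : m.Pairwise (fun a b => a.1 ≤ b.1)) :
    bScan x m = if memB x m then 1 else 0 := by
  induction m with
  | nil => rfl
  | cons r rest ih =>
    obtain ⟨s, e⟩ := r
    simp only [bScan, memB_cons]
    by_cases h1 : x < s
    · have hrest : memB x rest = false :=
        memB_false x rest (fun r hr => lt_of_lt_of_le h1 (List.rel_of_pairwise_cons hp hr))
      simp [h1, hrest]
    · by_cases h2 : x ≤ e
      · simp [h1, h2]
      · rw [ih hp.of_cons]
        simp [h1, h2]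

theorem per_char (x : Int) (ranges : List (Int × Int)) :
    aHit x ranges = bScan x (bMerge (PySem.List.sorted ranges Prod.fst)) := by
  have hp := PySem.List.sorted_pairwise ranges Prod.fst
  rw [aHit_eq, bScan_eq _ _ (merge_pairwise _ hp), merge_mem _ _ hp,
    memB_perm x (PySem.List.sorted_perm ranges Prod.fst false)]

-- ===== VERDICT (by name: the statement is the Claim_ definition above) =====
theorem count_chars_in_ranges_py_spec : Claim_equal_count_chars_in_ranges_py := by
  intro text ranges _
  unfold Spec_count_chars_in_ranges_py count_chars_in_ranges_py count_chars_in_ranges_py_alt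
  simp only [per_char]
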